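-- pv_equiv track=rewrite | github.com/haroon12h08/labs-hybrid-optimization | labs_optimizer/core.py | labs_cost
-- ===== SOURCE A (Python) =====
-- def labs_cost(sequence):
--     """
--     Computes the Energy/Cost for a Low Autocorrelation Binary Sequence (LABS).
--
--     The cost is defined as the sum of squared periodic autocorrelations
--     for all non-zero shifts k.
--
--     Formally:
--         C_k = sum_{i=0}^{N-k-1} s[i] * s[i+k]
--         Cost = sum_{k=1}^{N-1} (C_k)^2
--
--     Args:
--         sequence: A list or 1D array of integers, restricted to {-1, +1}.
--
--     Returns:
--         The integer cost (energy) of the sequence.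
--     """
--     N = len(sequence)
--     total_cost = 0
--
--     # Allow compatibility with both Python lists and NumPy arrays
--     # Explicit loop implementation for clarity as requested
--
--     # Iterate through each shift k from 1 to N-1
--     for k in range(1, N):
--         c_k = 0
--
--         # Compute autocorrelation for shift k
--         # Sum s[i] * s[i+k] for valid overlaps
--         for i in range(N - k):
--             c_k += sequence[i] * sequence[i + k]
--
--         # Add square of the autocorrelation to total cost
--         total_cost += c_k ** 2
--
--     return total_cost
-- ===== SOURCE B (Python) =====
-- def labs_cost(sequence):
--     N = len(sequence)
--     # One combined pass over all ordered pairs i < j, binning each product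
--     # s[i]*s[j] into the autocorrelation table slot for shift j - i.
--     c = [0] * N
--     for i in range(N):
--         si = sequence[i]
--         for j in range(i + 1, N):
--             c[j - i] += si * sequence[j]
--     # Separate reduction pass: sum of squared autocorrelations.
--     return sum(c[k] ** 2 for k in range(1, N))
-- ===== Notes on version B (the rewrite author's own statement) =====
-- stated objective: alternative
-- what changed: Instead of recomputing each shift-k autocorrelation by a fresh scan, B builds the whole autocorrelation table in one binning pass over ordered pairs (i,j), then squares and sums the table in a separate reduction pass.
import Mathlib
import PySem

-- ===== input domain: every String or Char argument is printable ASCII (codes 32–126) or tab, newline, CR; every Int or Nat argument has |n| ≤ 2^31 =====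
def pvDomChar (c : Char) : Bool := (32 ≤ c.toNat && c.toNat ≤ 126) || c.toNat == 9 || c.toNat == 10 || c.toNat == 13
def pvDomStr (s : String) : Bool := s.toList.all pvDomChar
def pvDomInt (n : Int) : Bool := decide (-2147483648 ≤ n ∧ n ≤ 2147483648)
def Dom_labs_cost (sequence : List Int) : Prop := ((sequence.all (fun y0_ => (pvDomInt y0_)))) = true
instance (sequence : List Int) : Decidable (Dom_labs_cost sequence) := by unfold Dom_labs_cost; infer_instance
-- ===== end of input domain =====

-- B replaces A's per-shift rescans by one binning pass over ordered pairs into an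
-- autocorrelation table, followed by a separate squaring/summing reduction pass
-- (objective: alternative decomposition, same asymptotic cost).

-- ===== PORT A =====
def labs_cost (sequence : List Int) : Int :=
  let N : Int := PySem.List.len sequence
  (PySem.List.pyRange 1 N 1).foldl
    (fun total_cost k =>
      let c_k : Int :=
        (PySem.List.pyRange 0 (N - k) 1).foldl
          (fun c i =>
            c + PySem.List.pyGetD sequence i 0 * PySem.List.pyGetD sequence (i + k) 0)
          0
      total_cost + c_k ^ 2)
    0

-- ===== PORT B =====
def labs_cost_alt (sequence : List Int) : Int :=
  let N : Int := PySem.List.len sequence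
  let c : List Int :=
    (PySem.List.pyRange 0 N 1).foldl
      (fun c i =>
        let si := PySem.List.pyGetD sequence i 0
        (PySem.List.pyRange (i + 1) N 1).foldl
          (fun c j =>
            PySem.List.pySetD c (j - i)
              (PySem.List.pyGetD c (j - i) 0 + si * PySem.List.pyGetD sequence j 0))
          c)
      (List.replicate N.toNat 0)
  (PySem.List.pyRange 1 N 1).foldl
    (fun total k => total + PySem.List.pyGetD c k 0 ^ 2)
    0

-- ===== PRECONDITION & SPEC =====
def Spec_labs_cost (sequence : List Int) (out : Int) : Prop := out = labs_cost_alt sequence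
instance (sequence : List Int) (out : Int) : Decidable (Spec_labs_cost sequence out) := by unfold Spec_labs_cost; infer_instance

-- ===== CLAIM (what is proved, stated in full; the proofs are below) =====
def Claim_equal_labs_cost : Prop := ∀ (sequence : List Int), Dom_labs_cost sequence → Spec_labs_cost sequence (labs_cost sequence)

-- ===== LEMMAS AND PROOFS =====

lemma getD_set_eq (t : List Int) (n : Nat) (v : Int) (k : Nat) (hk : k < t.length) :
    (t.set n v).getD k 0 = if n = k then v else t.getD k 0 := by
  by_cases h : n = k <;> simp [List.getD_eq_getElem?_getD, h, hk]

lemma inner_bin (s : List Int) (i si : Int) :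
    ∀ (m : Nat) (lo : Int) (t : List Int) (k : Nat), i < lo → k < t.length →
      (((PySem.List.pyRange lo (lo + m) 1).foldl
          (fun c j =>
            PySem.List.pySetD c (j - i)
              (PySem.List.pyGetD c (j - i) 0 + si * PySem.List.pyGetD s j 0))
          t).length = t.length)
      ∧ ((PySem.List.pyRange lo (lo + m) 1).foldl
          (fun c j =>
            PySem.List.pySetD c (j - i)
              (PySem.List.pyGetD c (j - i) 0 + si * PySem.List.pyGetD s j 0))
          t).getD k 0
        = t.getD k 0 +
          (if lo ≤ i + (k : Int) ∧ i + (k : Int) < lo + m then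
            si * PySem.List.pyGetD s (i + (k : Int)) 0 else 0) := by
  intro m
  induction m with
  | zero =>
    intro lo t k hlo hk
    rw [PySem.List.pyRange_one_eq_nil (by push_cast; omega)]
    refine ⟨rfl, ?_⟩
    rw [if_neg (by push_cast; omega)]
    simp
  | succ m ih =>
    intro lo t k hlo hk
    rw [PySem.List.pyRange_one_cons (by push_cast; omega), List.foldl_cons]
    have hrw : lo + ((m + 1 : Nat) : Int) = (lo + 1) + (m : Int) := by push_cast; ring
    rw [hrw]
    set v : Int := PySem.List.pyGetD t (lo - i) 0 + si * PySem.List.pyGetD s lo 0 with hv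
    have hset : PySem.List.pySetD t (lo - i) v = t.set (lo - i).toNat v :=
      PySem.List.pySetD_of_nonneg t v (by omega)
    have hlen' : (PySem.List.pySetD t (lo - i) v).length = t.length :=
      PySem.List.length_pySetD _ _ _
    obtain ⟨hl, hg⟩ := ih (lo + 1) (PySem.List.pySetD t (lo - i) v) k (by omega)
      (by rw [hlen']; exact hk)
    refine ⟨hl.trans hlen', ?_⟩
    rw [hg]
    have hget : (PySem.List.pySetD t (lo - i) v).getD k 0
        = if (lo - i).toNat = k then v else t.getD k 0 := by
      rw [hset]; exact getD_set_eq t _ v k hk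
    by_cases hik : i + (k : Int) = lo
    · have h1 : (lo - i).toNat = k := by omega
      have h2 : lo - i = (k : Int) := by omega
      rw [hget, if_pos h1, if_neg (by omega), if_pos (by constructor <;> omega), hv, h2]
      have h3 : lo = i + (k : Int) := by omega
      rw [h3]
      simp [PySem.List.pyGetD_natCast]
    · have h1 : (lo - i).toNat ≠ k := by omega
      rw [hget, if_neg h1]
      by_cases hc : lo ≤ i + (k : Int) ∧ i + (k : Int) < lo + 1 + (m : Int)
      · rw [if_pos (by omega), if_pos (by omega)]
      · rw [if_neg (by omega), if_neg (by omega)]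

lemma outer_bin (s : List Int) :
    ∀ (m : Nat) (lo : Int) (t : List Int) (k : Nat), 0 ≤ lo → k < t.length →
      (((PySem.List.pyRange lo (lo + m) 1).foldl
          (fun c i =>
            let si := PySem.List.pyGetD s i 0
            (PySem.List.pyRange (i + 1) (PySem.List.len s) 1).foldl
              (fun c j =>
                PySem.List.pySetD c (j - i)
                  (PySem.List.pyGetD c (j - i) 0 + si * PySem.List.pyGetD s j 0))
              c)
          t).length = t.length)
      ∧ ((PySem.List.pyRange lo (lo + m) 1).foldl
          (fun c i =>
            let si := PySem.List.pyGetD s i 0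
            (PySem.List.pyRange (i + 1) (PySem.List.len s) 1).foldl
              (fun c j =>
                PySem.List.pySetD c (j - i)
                  (PySem.List.pyGetD c (j - i) 0 + si * PySem.List.pyGetD s j 0))
              c)
          t).getD k 0
        = t.getD k 0 +
          ((PySem.List.pyRange lo (lo + m) 1).map
            (fun i => if 1 ≤ (k : Int) ∧ i + (k : Int) < (s.length : Int) then
              PySem.List.pyGetD s i 0 * PySem.List.pyGetD s (i + (k : Int)) 0 else 0)).sum := by
  intro m
  induction m with
  | zero =>
    intro lo t k _ _
    rw [PySem.List.pyRange_one_eq_nil (by push_cast; omega)]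
    simp
  | succ m ih =>
    intro lo t k hlo hk
    rw [PySem.List.pyRange_one_cons (by push_cast; omega), List.foldl_cons, List.map_cons,
      List.sum_cons]
    have hrw : lo + ((m + 1 : Nat) : Int) = (lo + 1) + (m : Int) := by push_cast; ring
    rw [hrw]
    simp only []
    -- the inner fold for i = lo
    have hbound : PySem.List.pyRange (lo + 1) (PySem.List.len s) 1
        = PySem.List.pyRange (lo + 1) ((lo + 1) + (((s.length : Int) - (lo + 1)).toNat : Int)) 1 := by
      rw [PySem.List.len_eq]
      by_cases h : lo + 1 ≤ (s.length : Int)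
      · congr 1; omega
      · rw [PySem.List.pyRange_one_eq_nil (by omega), PySem.List.pyRange_one_eq_nil (by omega)]
    obtain ⟨hil, hig⟩ := inner_bin s lo (PySem.List.pyGetD s lo 0)
      (((s.length : Int) - (lo + 1)).toNat) (lo + 1) t k (by omega) hk
    rw [hbound] at *
    set t' := (PySem.List.pyRange (lo + 1) ((lo + 1) + (((s.length : Int) - (lo + 1)).toNat : Int)) 1).foldl
      (fun c j => PySem.List.pySetD c (j - lo)
        (PySem.List.pyGetD c (j - lo) 0 + PySem.List.pyGetD s lo 0 * PySem.List.pyGetD s j 0)) t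
      with ht'
    obtain ⟨hl, hg⟩ := ih (lo + 1) t' k (by omega) (by rw [hil]; exact hk)
    refine ⟨hl.trans hil, ?_⟩
    rw [hg, hig]
    have hcond : (lo + 1 ≤ lo + (k : Int) ∧ lo + (k : Int) < lo + 1 + (((s.length : Int) - (lo + 1)).toNat : Int))
        ↔ (1 ≤ (k : Int) ∧ lo + (k : Int) < (s.length : Int)) := by
      constructor <;> intro h <;> constructor <;> omega
    by_cases h : 1 ≤ (k : Int) ∧ lo + (k : Int) < (s.length : Int)
    · rw [if_pos (hcond.mpr h), if_pos h]; ring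
    · rw [if_neg (fun hc => h (hcond.mp hc)), if_neg h]; ring

lemma slot_eq (s : List Int) (k : Nat) (h1 : 1 ≤ k) (h2 : k < s.length) :
    (((PySem.List.pyRange 0 (PySem.List.len s) 1).foldl
        (fun c i =>
          let si := PySem.List.pyGetD s i 0
          (PySem.List.pyRange (i + 1) (PySem.List.len s) 1).foldl
            (fun c j =>
              PySem.List.pySetD c (j - i)
                (PySem.List.pyGetD c (j - i) 0 + si * PySem.List.pyGetD s j 0))
            c)
        (List.replicate (PySem.List.len s).toNat 0)).getD k 0)
      = ((PySem.List.pyRange 0 ((s.length : Int) - k) 1).map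
          (fun i => PySem.List.pyGetD s i 0 * PySem.List.pyGetD s (i + (k : Int)) 0)).sum := by
  obtain ⟨_, hg⟩ := outer_bin s s.length 0 (List.replicate (PySem.List.len s).toNat 0) k
    le_rfl (by simp [PySem.List.len_eq]; omega)
  have hN' : (0 : Int) + (s.length : Int) = PySem.List.len s := by
    rw [PySem.List.len_eq]; ring
  rw [hN'] at hg
  have hrepl : (List.replicate (PySem.List.len s).toNat (0 : Int)).getD k 0 = 0 := by
    simp [List.getD_eq_getElem?_getD, h2]
  rw [hg, hrepl, zero_add, PySem.List.len_eq]
  have hsplit : PySem.List.pyRange (0 : Int) (s.length : Int) 1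
      = PySem.List.pyRange 0 ((s.length : Int) - (k : Int)) 1
        ++ PySem.List.pyRange ((s.length : Int) - (k : Int)) (s.length : Int) 1 :=
    PySem.List.pyRange_one_append 0 ((s.length : Int) - (k : Int)) _ (by omega) (by omega)
  rw [hsplit, List.map_append, List.sum_append]
  have hA : (PySem.List.pyRange 0 ((s.length : Int) - (k : Int)) 1).map
        (fun i => if 1 ≤ (k : Int) ∧ i + (k : Int) < (s.length : Int) then
          PySem.List.pyGetD s i 0 * PySem.List.pyGetD s (i + (k : Int)) 0 else 0)
      = (PySem.List.pyRange 0 ((s.length : Int) - (k : Int)) 1).map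
        (fun i => PySem.List.pyGetD s i 0 * PySem.List.pyGetD s (i + (k : Int)) 0) := by
    apply List.map_congr_left
    intro i hi
    rw [PySem.List.mem_pyRange_one] at hi
    rw [if_pos (by constructor <;> omega)]
  have hB : (PySem.List.pyRange ((s.length : Int) - (k : Int)) (s.length : Int) 1).map
        (fun i => if 1 ≤ (k : Int) ∧ i + (k : Int) < (s.length : Int) then
          PySem.List.pyGetD s i 0 * PySem.List.pyGetD s (i + (k : Int)) 0 else 0)
      = (PySem.List.pyRange ((s.length : Int) - (k : Int)) (s.length : Int) 1).map
        (fun _ => (0 : Int)) := by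
    apply List.map_congr_left
    intro i hi
    rw [PySem.List.mem_pyRange_one] at hi
    rw [if_neg (by omega)]
  rw [hA, hB]
  simp

-- A's shift-k inner scan equals B's table slot k (for 1 <= k < N).
lemma ck_eq (s : List Int) (k : Int) (h1 : 1 ≤ k) (h2 : k < (s.length : Int)) :
    (PySem.List.pyRange 0 (PySem.List.len s - k) 1).foldl
      (fun c i => c + PySem.List.pyGetD s i 0 * PySem.List.pyGetD s (i + k) 0) 0
    = PySem.List.pyGetD
        ((PySem.List.pyRange 0 (PySem.List.len s) 1).foldl
          (fun c i =>
            let si := PySem.List.pyGetD s i 0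
            (PySem.List.pyRange (i + 1) (PySem.List.len s) 1).foldl
              (fun c j =>
                PySem.List.pySetD c (j - i)
                  (PySem.List.pyGetD c (j - i) 0 + si * PySem.List.pyGetD s j 0))
              c)
          (List.replicate (PySem.List.len s).toNat 0)) k 0 := by
  have hkn : k = ((k.toNat : Nat) : Int) := by omega
  rw [hkn, PySem.List.pyGetD_natCast,
    slot_eq s k.toNat (by omega) (by omega),
    PySem.List.foldl_add (g := fun i => PySem.List.pyGetD s i 0 * PySem.List.pyGetD s (i + ((k.toNat : Nat) : Int)) 0),
    PySem.List.len_eq, zero_add]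

-- ===== VERDICT (by name: the statement is the Claim_ definition above) =====
theorem labs_cost_spec : Claim_equal_labs_cost := by
  intro s _
  unfold Spec_labs_cost labs_cost labs_cost_alt
  apply PySem.List.foldl_congr_mem
  intro acc k hk
  rw [PySem.List.mem_pyRange_one, PySem.List.len_eq] at hk
  dsimp only
  rw [ck_eq s k hk.1 hk.2]
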